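-- pv_equiv track=rewrite | github.com/zny919/dementia-detection-using-LogNCDE-and-Whisper | models/average.py | get_audio_true_labels
-- ===== SOURCE A (Python) =====
-- def to_int(x):
--     """Convert scalar tensor/array or Python number to int."""
--     return int(x.item()) if hasattr(x, "item") else int(x)
--
-- def get_audio_true_labels(indices_first_col, seg_labels):
--     """
--     Get audio-level true labels.
--
--     Assumes all segments from the same audio share the same label.
--     Uses the label of the first occurrence of each audio.
--     """
--     audio_true = {}
--     seen = set()
--     for idx, y in zip(indices_first_col, seg_labels):
--         idx_i = to_int(idx)
--         if idx_i not in seen: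
--             audio_true[idx_i] = int(y)
--             seen.add(idx_i)
--     return audio_true
-- ===== SOURCE B (Python) =====
-- def to_int(x):
--     """Convert scalar tensor/array or Python number to int."""
--     return int(x.item()) if hasattr(x, "item") else int(x)
--
-- def get_audio_true_labels(indices_first_col, seg_labels):
--     """
--     Get audio-level true labels.
--
--     Staged, branch-free version: one reverse pass in which an unconditional
--     overwrite makes the FIRST occurrence's label win (no membership test, no
--     seen-set), then dict.fromkeys for the first-occurrence key order, then one
--     comprehension assembling the result.
--     """
--     pairs = list(zip(indices_first_col, seg_labels))
--     label = {}
--     for idx, y in reversed(pairs):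
--         label[to_int(idx)] = int(y)          # earlier pairs overwrite later ones
--     order = dict.fromkeys(to_int(idx) for idx, _ in pairs)
--     return {k: label[k] for k in order}
-- ===== Notes on version B (the rewrite author's own statement) =====
-- stated objective: alternative
-- what changed: Replaces A's single stateful pass (dict + seen-set + membership branch) by three branch-free staged passes: a reverse pass whose unconditional dict overwrite makes each key's first label win, dict.fromkeys over the keys for the first-occurrence order, and a final comprehension assembling the result.
import Mathlib
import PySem

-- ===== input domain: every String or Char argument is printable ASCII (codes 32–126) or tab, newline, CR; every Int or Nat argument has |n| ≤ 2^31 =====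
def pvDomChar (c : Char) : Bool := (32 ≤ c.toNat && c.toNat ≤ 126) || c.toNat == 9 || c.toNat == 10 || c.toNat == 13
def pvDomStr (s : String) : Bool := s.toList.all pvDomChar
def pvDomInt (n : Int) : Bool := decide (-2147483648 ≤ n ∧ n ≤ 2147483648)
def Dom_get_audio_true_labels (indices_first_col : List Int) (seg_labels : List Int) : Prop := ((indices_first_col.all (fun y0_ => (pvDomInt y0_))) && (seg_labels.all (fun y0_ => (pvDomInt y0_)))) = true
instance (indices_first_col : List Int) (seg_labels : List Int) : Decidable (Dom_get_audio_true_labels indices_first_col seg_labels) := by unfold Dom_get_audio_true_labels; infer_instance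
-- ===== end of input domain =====

-- B replaces A's single stateful first-wins pass (dict + seen-set + membership branch) by three
-- branch-free staged passes: a reverse pass whose unconditional overwrite makes the first label win,
-- dict.fromkeys for the first-occurrence key order, and a final comprehension (objective: alternative).

-- ===== PORT A =====
def get_audio_true_labels (indices_first_col : List Int) (seg_labels : List Int) : List (Int × Int) :=
  let st := (indices_first_col.zip seg_labels).foldl
    (fun (st : PySem.Dict Int Int × PySem.Set Int) p =>
      if !(PySem.Set.contains st.2 p.1) then (st.1.insert p.1 p.2, PySem.Set.add st.2 p.1)
      else st)
    (PySem.Dict.empty, PySem.Set.empty)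
  st.1.items

-- ===== PORT B =====
-- `label[k]` is ported as `getD k 0`: every k iterated comes from the pairs' first column, so it is
-- a key of `label` and the default is never used (no KeyError is reachable).
def get_audio_true_labels_alt (indices_first_col : List Int) (seg_labels : List Int) : List (Int × Int) :=
  let pairs := indices_first_col.zip seg_labels
  let label := pairs.reverse.foldl
    (fun (d : PySem.Dict Int Int) p => d.insert p.1 p.2) PySem.Dict.empty
  let order := PySem.List.dedup (pairs.map (fun p => p.1))
  (order.foldl (fun (d : PySem.Dict Int Int) k => d.insert k (label.getD k 0))
    PySem.Dict.empty).items

-- ===== PRECONDITION & SPEC =====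
def Spec_get_audio_true_labels (indices_first_col : List Int) (seg_labels : List Int) (out : List (Int × Int)) : Prop := out = get_audio_true_labels_alt indices_first_col seg_labels
instance (indices_first_col : List Int) (seg_labels : List Int) (out : List (Int × Int)) : Decidable (Spec_get_audio_true_labels indices_first_col seg_labels out) := by unfold Spec_get_audio_true_labels; infer_instance

-- ===== CLAIM (what is proved, stated in full; the proofs are below) =====
def Claim_equal_get_audio_true_labels : Prop := ∀ (indices_first_col : List Int) (seg_labels : List Int), Dom_get_audio_true_labels indices_first_col seg_labels → Spec_get_audio_true_labels indices_first_col seg_labels (get_audio_true_labels indices_first_col seg_labels)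

-- ===== LEMMAS AND PROOFS =====

-- Reference: first-occurrence filter, threading the list of already-seen keys.
def pvFirstOcc : List Int → List (Int × Int) → List (Int × Int)
  | _, [] => []
  | s, p :: ps =>
    if s.contains p.1 then pvFirstOcc (s ++ [p.1]) ps
    else p :: pvFirstOcc (s ++ [p.1]) ps

-- The value B's reverse-overwrite dict holds for key k (= first value paired with k, if any).
def pvLab (l : List (Int × Int)) (k : Int) : Int :=
  (l.reverse.foldl (fun (d : PySem.Dict Int Int) p => d.insert p.1 p.2) PySem.Dict.empty).getD k 0

theorem pvLab_cons (p : Int × Int) (l : List (Int × Int)) (k : Int) :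
    pvLab (p :: l) k = if k = p.1 then p.2 else pvLab l k := by
  unfold pvLab
  rw [List.reverse_cons, List.foldl_append]
  simp [PySem.Dict.getD_insert]

theorem pvFirstOcc_cons_mem (s : List Int) (p : Int × Int) (ps : List (Int × Int))
    (h : p.1 ∈ s) : pvFirstOcc s (p :: ps) = pvFirstOcc (s ++ [p.1]) ps := by
  simp [pvFirstOcc, h]

theorem pvFirstOcc_cons_not_mem (s : List Int) (p : Int × Int) (ps : List (Int × Int))
    (h : p.1 ∉ s) : pvFirstOcc s (p :: ps) = p :: pvFirstOcc (s ++ [p.1]) ps := by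
  simp [pvFirstOcc, h]

theorem pvFirstOcc_congr (ps : List (Int × Int)) :
    ∀ s t : List Int, (∀ k, (k ∈ s ↔ k ∈ t)) → pvFirstOcc s ps = pvFirstOcc t ps := by
  induction ps with
  | nil => intro s t h; rfl
  | cons p ps ih =>
    intro s t h
    have hc : s.contains p.1 = t.contains p.1 := by
      simp [h p.1]
    have h' : ∀ k, (k ∈ s ++ [p.1] ↔ k ∈ t ++ [p.1]) := by
      intro k; simp [h k]
    simp only [pvFirstOcc, hc]
    by_cases hb : t.contains p.1 = true <;> simp [ih _ _ h']

theorem pvSeenGrow (s : List Int) (k : Int) (hk : k ∈ s) (ps : List (Int × Int)) :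
    pvFirstOcc (s ++ [k]) ps = pvFirstOcc s ps := by
  apply pvFirstOcc_congr
  intro x; simp; intro hx; subst hx; exact hk

-- A's loop: the dict accumulates the first-occurrence pairs, the seen-set tracking the dict's keys.
theorem pvFoldA (ps : List (Int × Int)) :
    ∀ (d : PySem.Dict Int Int) (s : PySem.Set Int),
    (∀ k, d.contains k = true → k ∈ s) →
    ((ps.foldl
      (fun (st : PySem.Dict Int Int × PySem.Set Int) p =>
        if !(PySem.Set.contains st.2 p.1) then (st.1.insert p.1 p.2, PySem.Set.add st.2 p.1)
        else st)
      (d, s)).1).items = d.items ++ pvFirstOcc s ps := by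
  induction ps with
  | nil => intro d s _; simp [pvFirstOcc]
  | cons p ps ih =>
    intro d s hinv
    by_cases hm : p.1 ∈ s
    · have hc : PySem.Set.contains s p.1 = true := by
        simp [PySem.Set.contains, hm]
      simp only [List.foldl_cons, hc, Bool.not_true, Bool.false_eq_true, if_false]
      rw [ih d s hinv, pvFirstOcc_cons_mem _ _ _ hm, pvSeenGrow _ _ hm]
    · have hc : PySem.Set.contains s p.1 = false := by
        simp [PySem.Set.contains, hm]
      have hd : d.contains p.1 = false := by
        by_contra h
        exact hm (hinv p.1 (by revert h; cases d.contains p.1 <;> simp))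
      have hadd : PySem.Set.add s p.1 = s ++ [p.1] := PySem.Set.add_of_not_mem hm
      have hinv' : ∀ k, (d.insert p.1 p.2).contains k = true → k ∈ s ++ [p.1] := by
        intro k hk
        rw [PySem.Dict.contains_insert] at hk
        simp at hk ⊢
        rcases hk with h | h
        · right; omega
        · left; exact hinv k h
      simp only [List.foldl_cons, hc, Bool.not_false, if_true]
      rw [hadd, ih _ _ hinv']
      rw [PySem.Dict.items_insert, hd]
      simp only [Bool.false_eq_true, if_false]
      rw [pvFirstOcc_cons_not_mem _ _ _ hm]
      simp

-- The seen-list only acts as a filter on the result.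
theorem pvFirstOcc_filter (ps : List (Int × Int)) :
    ∀ s : List Int, pvFirstOcc s ps = (pvFirstOcc [] ps).filter (fun q => !(s.contains q.1)) := by
  induction ps with
  | nil => intro s; rfl
  | cons p ps ih =>
    intro s
    have h0 : pvFirstOcc [] (p :: ps) = p :: (pvFirstOcc [] ps).filter (fun q => !([p.1].contains q.1)) := by
      rw [pvFirstOcc_cons_not_mem _ _ _ (List.not_mem_nil)]
      simp only [List.nil_append]
      exact congrArg _ (ih [p.1])
    by_cases hm : p.1 ∈ s
    · rw [pvFirstOcc_cons_mem _ _ _ hm, pvSeenGrow _ _ hm, ih s, h0]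
      rw [List.filter_cons]
      have : (!(s.contains p.1)) = false := by simp [hm]
      rw [this]
      simp only [Bool.false_eq_true, if_false, List.filter_filter]
      apply List.filter_congr
      intro q _
      by_cases hq : q.1 ∈ s
      · simp [hq]
      · have : q.1 ≠ p.1 := fun h => hq (h ▸ hm)
        simp [hq, this]
    · rw [pvFirstOcc_cons_not_mem _ _ _ hm, h0, ih (s ++ [p.1])]
      rw [List.filter_cons]
      have : (!(s.contains p.1)) = true := by simp [hm]
      rw [this]
      simp only [if_true, List.filter_filter]
      refine congrArg _ ?_
      apply List.filter_congr
      intro q _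
      by_cases h1 : q.1 = p.1 <;> by_cases h2 : q.1 ∈ s <;> simp [h1, h2]

-- First occurrences = the deduplicated key list paired with the reverse-overwrite values.
theorem pvMain (ps : List (Int × Int)) :
    pvFirstOcc [] ps
      = (PySem.Set.ofList (ps.map (fun p => p.1))).map (fun k => (k, pvLab ps k)) := by
  induction ps with
  | nil => rfl
  | cons p ps ih =>
    rw [pvFirstOcc_cons_not_mem _ _ _ (List.not_mem_nil), List.nil_append,
        pvFirstOcc_filter ps [p.1]]
    rw [List.map_cons, PySem.Set.ofList_cons, List.map_cons]
    have hdisc : PySem.Set.discard (PySem.Set.ofList (ps.map (fun p => p.1))) p.1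
        = (PySem.Set.ofList (ps.map (fun p => p.1))).filter (fun y => !(y == p.1)) := by
      simp [PySem.Set.discard]
    have hhead : (p.1, pvLab (p :: ps) p.1) = p := by
      rw [pvLab_cons]; simp
    rw [hdisc, hhead]
    refine congrArg _ ?_
    -- tail: map over the filtered dedup list, with pvLab (p::ps) = pvLab ps off p.1
    have hmap : ((PySem.Set.ofList (ps.map (fun p => p.1))).filter (fun y => !(y == p.1))).map
          (fun k => (k, pvLab (p :: ps) k))
        = ((PySem.Set.ofList (ps.map (fun p => p.1))).filter (fun y => !(y == p.1))).map
          (fun k => (k, pvLab ps k)) := by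
      apply List.map_congr_left
      intro k hk
      have hne : k ≠ p.1 := by
        have := List.of_mem_filter hk
        simpa using this
      rw [pvLab_cons]
      simp [hne]
    rw [hmap, ih, List.filter_map]
    refine congrArg _ ?_
    apply List.filter_congr
    intro k _
    by_cases h : k = p.1 <;> simp [h]

-- B's final loop inserts distinct fresh keys, so its items are exactly the mapped dedup list.
theorem pvFoldB (order : List Int) (label : PySem.Dict Int Int) (h : order.Nodup) :
    ((order.foldl (fun (d : PySem.Dict Int Int) k => d.insert k (label.getD k 0))
      PySem.Dict.empty)).items = order.map (fun k => (k, label.getD k 0)) := by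
  have := PySem.Dict.items_foldl_insert_fresh (l := order) (k := fun a => a)
    (v := fun a => label.getD a 0) (d := PySem.Dict.empty)
    (by intro a _; exact PySem.Dict.contains_empty a) (by simpa using h)
  simpa using this

-- ===== VERDICT (by name: the statement is the Claim_ definition above) =====
theorem get_audio_true_labels_spec : Claim_equal_get_audio_true_labels := by
  intro a b _
  show get_audio_true_labels a b = get_audio_true_labels_alt a b
  unfold get_audio_true_labels get_audio_true_labels_alt
  dsimp only
  rw [pvFoldA (a.zip b) PySem.Dict.empty PySem.Set.empty
        (by intro k h; simp [PySem.Dict.contains, PySem.Dict.empty] at h)]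
  rw [pvFoldB _ _ (by simp [PySem.List.dedup_eq_ofList, PySem.Set.nodup_ofList])]
  rw [PySem.List.dedup_eq_ofList]
  simpa [pvLab] using pvMain (a.zip b)
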